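-- pv_equiv track=rewrite | github.com/wolsen/packastack | packastack/package/uscan.py | _split_unescaped
-- ===== SOURCE A (Python) =====
-- def _split_unescaped(value: str, delimiter: str) -> list[str]:
--     """Split a string on a delimiter, ignoring escaped delimiters.
--
--     This utility mirrors how ``sed`` parses substitution tokens: the string
--     is broken at unescaped delimiter characters while escaped delimiters are
--     retained in the resulting segments.  It enables reliable parsing of
--     mangle expressions that may include literal delimiter characters.
--     """
--     parts: list[str] = []
--     current: list[str] = []
--     escaped = False
--
--     for char in value:
--         if escaped:
--             current.append(char)
--             escaped = False
--             continue
--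
--         if char == "\\":
--             current.append(char)
--             escaped = True
--             continue
--
--         if char == delimiter:
--             parts.append("".join(current))
--             current = []
--             continue
--
--         current.append(char)
--
--     parts.append("".join(current))
--     return parts
-- ===== SOURCE B (Python) =====
-- def _find_unescaped(value, delimiter, i):
--     """Index of the first unescaped delimiter char at or after i, else None."""
--     n = len(value)
--     while i < n:
--         c = value[i]
--         if c == "\\":
--             i += 2
--         elif c == delimiter:
--             return i
--         else:
--             i += 1
--     return None
--
--
-- def _split_unescaped(value: str, delimiter: str) -> list[str]:
--     """Split on unescaped delimiter chars by slicing at the first hit and recursing."""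
--     i = _find_unescaped(value, delimiter, 0)
--     if i is None:
--         return [value]
--     return [value[:i]] + _split_unescaped(value[i + 1:], delimiter)
-- ===== Notes on version B (the rewrite author's own statement) =====
-- stated objective: alternative
-- what changed: A builds every segment character-by-character in one pass with a (parts, current, escaped) accumulator; B instead finds the index of the first unescaped delimiter (skipping escape pairs by stepping the index by 2) and slices the string there, recursing on the remainder, so segments are produced by slicing rather than by accumulation.
import Mathlib
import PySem

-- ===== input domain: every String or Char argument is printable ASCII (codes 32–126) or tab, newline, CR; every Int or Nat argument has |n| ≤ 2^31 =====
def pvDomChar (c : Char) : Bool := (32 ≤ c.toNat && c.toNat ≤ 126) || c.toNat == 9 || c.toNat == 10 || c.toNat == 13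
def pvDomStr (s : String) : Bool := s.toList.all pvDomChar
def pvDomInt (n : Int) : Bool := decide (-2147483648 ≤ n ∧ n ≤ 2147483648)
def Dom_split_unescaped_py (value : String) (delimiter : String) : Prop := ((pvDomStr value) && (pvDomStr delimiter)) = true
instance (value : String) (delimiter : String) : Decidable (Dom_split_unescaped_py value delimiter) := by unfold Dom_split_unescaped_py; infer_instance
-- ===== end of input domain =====

-- B replaces A's single-pass character-accumulator with a find-first-unescaped-delimiter-then-slice-and-recurse
-- decomposition (objective: alternative; return value only, no side effects involved).

-- ===== PORT A =====
-- the for-loop of A over `value` with state (parts, current, escaped); branches in A's order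
def pvALoop (delimiter : String) : List Char → List String × List Char × Bool → List String × List Char × Bool
  | [], st => st
  | c :: cs, (parts, current, escaped) =>
    if escaped then pvALoop delimiter cs (parts, current ++ [c], false)
    else if c = '\\' then pvALoop delimiter cs (parts, current ++ [c], true)
    else if String.ofList [c] = delimiter then pvALoop delimiter cs (parts ++ [String.ofList current], [], false)
    else pvALoop delimiter cs (parts, current ++ [c], false)

def split_unescaped_py (value : String) (delimiter : String) : List String :=
  match pvALoop delimiter value.toList ([], [], false) with
  | (parts, current, _) => parts ++ [String.ofList current]

-- ===== PORT B =====
-- Source B's _find_unescaped: while-loop over the index, i.e. recursion on the remaining characters;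
-- `rest.drop 1` realises the `i += 2` skip over the escaped character, `i` is the absolute index
def pvBFind (delimiter : String) : List Char → Nat → Option Nat
  | [], _ => none
  | c :: rest, i =>
    if c = '\\' then pvBFind delimiter (rest.drop 1) (i + 2)
    else if String.ofList [c] = delimiter then some i
    else pvBFind delimiter rest (i + 1)
termination_by cs _ => cs.length
decreasing_by
  all_goals simp

-- Source B's _split_unescaped: slice [value[:i]] and recurse on value[i+1:]
def pvBGo (delimiter : String) (cs : List Char) : List String :=
  match h : pvBFind delimiter cs 0 with
  | none => [String.ofList cs]
  | some i => String.ofList (cs.take i) :: pvBGo delimiter (cs.drop (i + 1))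
termination_by cs.length
decreasing_by
  have hne : cs ≠ [] := by intro he; subst he; simp [pvBFind] at h
  have hpos : 0 < cs.length := List.length_pos_iff.mpr hne
  simp
  omega

def split_unescaped_py_alt (value : String) (delimiter : String) : List String :=
  pvBGo delimiter value.toList

-- ===== PRECONDITION & SPEC =====
def Spec_split_unescaped_py (value : String) (delimiter : String) (out : List String) : Prop := out = split_unescaped_py_alt value delimiter
instance (value : String) (delimiter : String) (out : List String) : Decidable (Spec_split_unescaped_py value delimiter out) := by unfold Spec_split_unescaped_py; infer_instance

-- ===== CLAIM (what is proved, stated in full; the proofs are below) =====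
def Claim_equal_split_unescaped_py : Prop := ∀ (value : String) (delimiter : String), Dom_split_unescaped_py value delimiter → Spec_split_unescaped_py value delimiter (split_unescaped_py value delimiter)

-- ===== LEMMAS AND PROOFS =====

theorem pvBGo_eq_none (d : String) (cs : List Char) (h : pvBFind d cs 0 = none) :
    pvBGo d cs = [String.ofList cs] := by
  rw [pvBGo]; split <;> simp_all

theorem pvBGo_eq_some (d : String) (cs : List Char) (i : Nat) (h : pvBFind d cs 0 = some i) :
    pvBGo d cs = String.ofList (cs.take i) :: pvBGo d (cs.drop (i + 1)) := by
  rw [pvBGo]; split <;> simp_all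

-- prefix the first segment of a split with the characters `p`
def pvConsHead (p : List Char) : List String → List String
  | [] => [String.ofList p]
  | s :: rest => (String.ofList p ++ s) :: rest

theorem pvConsHead_consHead (a b : List Char) (l : List String) :
    pvConsHead a (pvConsHead b l) = pvConsHead (a ++ b) l := by
  cases l <;> simp [pvConsHead, String.ofList_append, String.append_assoc]

theorem pvBFind_shift (d : String) :
    ∀ (n : Nat) (cs : List Char), cs.length ≤ n → ∀ i, pvBFind d cs i = (pvBFind d cs 0).map (· + i) := by
  intro n
  induction n with
  | zero =>
    intro cs hcs i
    have : cs = [] := List.eq_nil_of_length_eq_zero (Nat.le_zero.mp hcs)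
    subst this; simp [pvBFind]
  | succ n ih =>
    intro cs hcs i
    cases cs with
    | nil => simp [pvBFind]
    | cons c rest =>
      simp only [pvBFind]
      by_cases hb : c = '\\'
      · simp only [hb, if_pos rfl]
        have hlen : (rest.drop 1).length ≤ n := by
          simp only [List.length_drop]; simp at hcs; omega
        rw [ih _ hlen (i + 2), ih _ hlen 2]
        cases pvBFind d (rest.drop 1) 0 <;> simp [Option.map_map] <;> omega
      · simp only [if_neg hb]
        by_cases hd : String.ofList [c] = d
        · simp [hd]
        · simp only [if_neg hd]
          have hlen : rest.length ≤ n := by simp at hcs; omega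
          rw [ih _ hlen (i + 1), ih _ hlen 1]
          cases pvBFind d rest 0 <;> simp <;> omega

theorem pvBGo_ne_nil (d : String) (cs : List Char) : pvBGo d cs ≠ [] := by
  rcases hf : pvBFind d cs 0 with _ | i
  · rw [pvBGo_eq_none d cs hf]; simp
  · rw [pvBGo_eq_some d cs i hf]; simp

theorem pvConsHead_nil (l : List String) (h : l ≠ []) : pvConsHead [] l = l := by
  cases l with
  | nil => exact absurd rfl h
  | cons s r => simp [pvConsHead]

-- bGo on a non-escape, non-delimiter head char
theorem pvBGo_cons (d : String) (c : Char) (cs : List Char)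
    (hb : c ≠ '\\') (hd : String.ofList [c] ≠ d) :
    pvBGo d (c :: cs) = pvConsHead [c] (pvBGo d cs) := by
  have hfind : pvBFind d (c :: cs) 0 = (pvBFind d cs 0).map (· + 1) := by
    simp only [pvBFind, if_neg hb, if_neg hd]
    exact pvBFind_shift d cs.length cs le_rfl 1
  rcases hf : pvBFind d cs 0 with _ | i
  · rw [hf] at hfind
    rw [pvBGo_eq_none d _ hfind, pvBGo_eq_none d cs hf]
    simp [pvConsHead, ← String.ofList_append]
  · rw [hf] at hfind; simp only [Option.map_some] at hfind
    rw [pvBGo_eq_some d _ _ hfind, pvBGo_eq_some d cs i hf]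
    simp [pvConsHead, ← String.ofList_append]

-- bGo on an escape pair
theorem pvBGo_esc (d : String) (c2 : Char) (cs : List Char) :
    pvBGo d ('\\' :: c2 :: cs) = pvConsHead ['\\', c2] (pvBGo d cs) := by
  have hfind : pvBFind d ('\\' :: c2 :: cs) 0 = (pvBFind d cs 0).map (· + 2) := by
    simp only [pvBFind, if_pos rfl, List.drop_succ_cons, List.drop_zero]
    exact pvBFind_shift d cs.length cs le_rfl 2
  rcases hf : pvBFind d cs 0 with _ | i
  · rw [hf] at hfind
    rw [pvBGo_eq_none d _ hfind, pvBGo_eq_none d cs hf]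
    simp [pvConsHead, ← String.ofList_append]
  · rw [hf] at hfind; simp only [Option.map_some] at hfind
    rw [pvBGo_eq_some d _ _ hfind, pvBGo_eq_some d cs i hf]
    have h2 : i + 2 + 1 = i + 1 + 1 + 1 := by omega
    rw [h2]
    simp [pvConsHead, ← String.ofList_append]

-- bGo on a bare delimiter head
theorem pvBGo_delim (d : String) (c : Char) (cs : List Char)
    (hb : c ≠ '\\') (hd : String.ofList [c] = d) :
    pvBGo d (c :: cs) = "" :: pvBGo d cs := by
  have hfind : pvBFind d (c :: cs) 0 = some 0 := by
    simp [pvBFind, hb, hd]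
  rw [pvBGo_eq_some d _ 0 hfind]
  simp

theorem pvMain (d : String) :
    ∀ (n : Nat) (cs : List Char), cs.length ≤ n → ∀ (parts : List String) (current : List Char),
      (match pvALoop d cs (parts, current, false) with
       | (p, cur, _) => p ++ [String.ofList cur]) = parts ++ pvConsHead current (pvBGo d cs) := by
  intro n
  induction n with
  | zero =>
    intro cs hcs parts current
    have : cs = [] := List.eq_nil_of_length_eq_zero (Nat.le_zero.mp hcs)
    subst this
    rw [pvBGo_eq_none d [] (by simp [pvBFind])]
    simp [pvALoop, pvConsHead]
  | succ n ih =>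
    intro cs hcs parts current
    cases cs with
    | nil =>
      rw [pvBGo_eq_none d [] (by simp [pvBFind])]
      simp [pvALoop, pvConsHead]
    | cons c cs =>
      by_cases hb : c = '\\'
      · subst hb
        cases cs with
        | nil =>
          rw [pvBGo_eq_none d ['\\'] (by simp [pvBFind])]
          simp [pvALoop, pvConsHead]
        | cons c2 cs' =>
          have hstep : pvALoop d ('\\' :: c2 :: cs') (parts, current, false)
              = pvALoop d cs' (parts, current ++ ['\\', c2], false) := by
            simp [pvALoop]
          rw [hstep, ih cs' (by simp at hcs; omega) parts (current ++ ['\\', c2]),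
              pvBGo_esc, pvConsHead_consHead]
      · by_cases hd : String.ofList [c] = d
        · have hstep : pvALoop d (c :: cs) (parts, current, false)
              = pvALoop d cs (parts ++ [String.ofList current], [], false) := by
            simp [pvALoop, hb, hd]
          rw [hstep, ih cs (by simp at hcs; omega) (parts ++ [String.ofList current]) [],
              pvBGo_delim d c cs hb hd, pvConsHead_nil _ (pvBGo_ne_nil d cs)]
          simp [pvConsHead]
        · have hstep : pvALoop d (c :: cs) (parts, current, false)
              = pvALoop d cs (parts, current ++ [c], false) := by
            simp [pvALoop, hb, hd]
          rw [hstep, ih cs (by simp at hcs; omega) parts (current ++ [c]),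
              pvBGo_cons d c cs hb hd, pvConsHead_consHead]

-- ===== VERDICT (by name: the statement is the Claim_ definition above) =====
theorem split_unescaped_py_spec : Claim_equal_split_unescaped_py := by
  intro value delimiter _
  unfold Spec_split_unescaped_py split_unescaped_py split_unescaped_py_alt
  rw [pvMain delimiter value.toList.length value.toList le_rfl [] []]
  simp [pvConsHead_nil _ (pvBGo_ne_nil delimiter value.toList)]
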